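-- pv_equiv track=rewrite | github.com/k-harada/AtCoder | ABC138/F_fail.py | get_r
-- ===== SOURCE A (Python) =====
-- LARGE = 10 ** 9 + 7
--
-- def get_r(vr):
--     # 0 <= L <= R <= vr
--     if vr == 0:
--         return 1
--     elif vr == 1:
--         return 3
--     l_ = 0
--     while True:
--         if 2 ** (l_ + 1) - 1 > vr:
--             break
--         l_ += 1
--     if 2 ** l_ - 1 == vr:
--         return pow(3, l_, LARGE)
--     else:
--         return (pow(3, l_, LARGE) + 2 * get_r(vr - 2 ** l_)) % LARGE
-- ===== SOURCE B (Python) =====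
-- LARGE = 10 ** 9 + 7
--
-- def get_r(vr):
--     # Iterative version: accumulate the recursion's sum with a running coefficient.
--     result = 0
--     coef = 1
--     while True:
--         l_ = (vr + 1).bit_length() - 1  # largest l with 2**l - 1 <= vr
--         result = (result + coef * pow(3, l_, LARGE)) % LARGE
--         if 2 ** l_ - 1 == vr:
--             return result
--         vr -= 2 ** l_
--         coef = coef * 2 % LARGE
-- ===== Notes on version B (the rewrite author's own statement) =====
-- stated objective: simpler
-- what changed: Replaced the recursion (with its two special cases and a while-scan for the exponent) by a single accumulation loop that keeps a running result and doubling coefficient and gets the exponent from bit_length.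
import Mathlib
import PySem

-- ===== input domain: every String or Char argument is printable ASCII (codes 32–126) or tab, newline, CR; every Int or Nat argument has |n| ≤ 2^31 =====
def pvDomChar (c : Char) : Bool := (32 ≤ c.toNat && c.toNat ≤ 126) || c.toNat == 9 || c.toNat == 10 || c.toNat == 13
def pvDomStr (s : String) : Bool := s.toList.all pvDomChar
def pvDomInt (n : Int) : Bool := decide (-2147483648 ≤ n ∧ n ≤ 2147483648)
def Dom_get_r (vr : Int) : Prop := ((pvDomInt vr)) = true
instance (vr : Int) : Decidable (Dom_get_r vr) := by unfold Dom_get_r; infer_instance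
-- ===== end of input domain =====

-- B replaces A's recursion (with its two special cases and a while-scan for the
-- exponent) by one accumulation loop with a running coefficient; objective: simpler.

def pvLARGE : Int := 10 ^ 9 + 7

-- ===== PORT A =====
-- A's 'while True: if 2**(l_+1)-1 > vr: break; l_ += 1', started at l_ = 0.
def getrWhile (vr : Nat) (l : Nat) : Nat :=
  if 2 ^ (l + 1) - 1 > vr then l else getrWhile vr (l + 1)
  termination_by vr + 1 - l
  decreasing_by
    rename_i h
    have hl : l + 1 ≤ 2 ^ (l + 1) - 1 := by
      have := Nat.lt_two_pow_self (n := l + 1); omega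
    omega

-- A's body, literally, on the Nat value of vr (A diverges for vr < 0, excluded by Pre_).
def getrA (n : Nat) : Int :=
  if h0 : n = 0 then 1
  else if h1 : n = 1 then 3
  else
    if 2 ^ getrWhile n 0 - 1 = n then PySem.Int.powMod 3 (getrWhile n 0) pvLARGE
    else
      (PySem.Int.powMod 3 (getrWhile n 0) pvLARGE
        + 2 * getrA (n - 2 ^ getrWhile n 0)) % pvLARGE
  termination_by n
  decreasing_by
    have hl1 : 1 ≤ 2 ^ getrWhile n 0 := Nat.one_le_two_pow
    omega

def get_r (vr : Int) : Int := getrA vr.toNat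

-- ===== PORT B =====
-- B's loop: (vr+1).bit_length() - 1 is Nat.log2 (n+1); accumulate result, double coef.
def getrLoop : Nat → Int → Int → Int
  | n, result, coef =>
    if h : 2 ^ Nat.log2 (n + 1) - 1 = n then
      (result + coef * PySem.Int.powMod 3 (Nat.log2 (n + 1)) pvLARGE) % pvLARGE
    else
      getrLoop (n - 2 ^ Nat.log2 (n + 1))
        ((result + coef * PySem.Int.powMod 3 (Nat.log2 (n + 1)) pvLARGE) % pvLARGE)
        (coef * 2 % pvLARGE)
  termination_by n _ _ => n
  decreasing_by
    have hl1 : 1 ≤ 2 ^ Nat.log2 (n + 1) := Nat.one_le_two_pow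
    have hn : 0 < n := by
      rcases Nat.eq_zero_or_pos n with h0 | h0
      · subst h0; exact absurd (by decide) h
      · exact h0
    omega

def get_r_alt (vr : Int) : Int := getrLoop vr.toNat 0 1

-- ===== PRECONDITION & SPEC =====
-- A recurses forever (RecursionError) on vr < 0; Pre_ is the documented domain 0 ≤ vr.
def Pre_get_r (vr : Int) : Prop := 0 ≤ vr
instance (vr : Int) : Decidable (Pre_get_r vr) := by unfold Pre_get_r; infer_instance
def pvWitness_get_r : Int := 6

def Spec_get_r (vr : Int) (out : Int) : Prop := out = get_r_alt vr
instance (vr : Int) (out : Int) : Decidable (Spec_get_r vr out) := by unfold Spec_get_r; infer_instance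

-- ===== CLAIM (what is proved, stated in full; the proofs are below) =====
def Claim_equal_get_r : Prop := ∀ (vr : Int), Dom_get_r vr → Pre_get_r vr → Spec_get_r vr (get_r vr)

-- ===== LEMMAS AND PROOFS =====

theorem pvLARGE_pos : (0 : Int) < pvLARGE := by decide

-- A's while-scan computes the floor log of n+1, from any start l with 2^l ≤ n + 1.
theorem getrWhile_eq_log2 (n : Nat) (l : Nat) (h : 2 ^ l ≤ n + 1) :
    getrWhile n l = Nat.log2 (n + 1) := by
  rw [getrWhile]
  split
  · rename_i hgt
    rw [Nat.log2_eq_log_two]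
    exact (Nat.log_eq_of_pow_le_of_lt_pow h (by omega)).symm
  · rename_i hle
    exact getrWhile_eq_log2 n (l + 1) (by omega)
  termination_by n + 1 - l
  decreasing_by
    rename_i hle
    have hl : l + 1 ≤ 2 ^ (l + 1) - 1 := by
      have := Nat.lt_two_pow_self (n := l + 1); omega
    omega

-- getrA is already reduced modulo pvLARGE.
theorem getrA_range (n : Nat) : 0 ≤ getrA n ∧ getrA n < pvLARGE := by
  rw [getrA.eq_def]
  split
  · exact ⟨by norm_num, by decide⟩
  split
  · exact ⟨by norm_num, by decide⟩
  split
  · rw [PySem.Int.powMod_eq_emod _ _ pvLARGE_pos]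
    exact ⟨Int.emod_nonneg _ (by decide), Int.emod_lt_of_pos _ pvLARGE_pos⟩
  · exact ⟨Int.emod_nonneg _ (by decide), Int.emod_lt_of_pos _ pvLARGE_pos⟩

-- In the case where B's loop stops, A's value is exactly 3^log2(n+1) mod pvLARGE.
theorem getrA_terminal (n : Nat) (h : 2 ^ Nat.log2 (n + 1) - 1 = n) :
    getrA n = PySem.Int.powMod 3 (Nat.log2 (n + 1)) pvLARGE := by
  rw [getrA.eq_def]
  split
  · rename_i h0; subst h0; decide
  split
  · rename_i _ h1; subst h1; decide
  · rw [getrWhile_eq_log2 n 0 (by omega)]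
    simp [h]

-- modular bookkeeping for one unfolding of the loop
theorem pv_mod_step (r c p g L : Int) :
    ((r + c * p) % L + (c * 2 % L) * g) % L = (r + c * ((p + 2 * g) % L)) % L := by
  have h1 : ((r + c * p) % L + (c * 2 % L) * g) ≡ ((r + c * p) + (c * 2) * g) [ZMOD L] :=
    (Int.mod_modEq _ _).add ((Int.mod_modEq _ _).mul_right g)
  have h2 : (r + c * ((p + 2 * g) % L)) ≡ (r + c * (p + 2 * g)) [ZMOD L] :=
    (Int.ModEq.refl r).add ((Int.mod_modEq _ _).mul_left c)
  have h3 : ((r + c * p) + (c * 2) * g) = (r + c * (p + 2 * g)) := by ring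
  exact h1.trans (h3 ▸ h2.symm)

-- the loop invariant: getrLoop folds A's recursion into (result + coef * A) % pvLARGE
theorem getrLoop_invariant (n : Nat) (r c : Int) :
    getrLoop n r c = (r + c * getrA n) % pvLARGE := by
  rw [getrLoop]
  split
  · rename_i h
    rw [getrA_terminal n h]
  · rename_i h
    have hl1 : 1 ≤ 2 ^ Nat.log2 (n + 1) := Nat.one_le_two_pow
    have hn : 0 < n := by
      rcases Nat.eq_zero_or_pos n with h0 | h0
      · subst h0; exact absurd (by decide) h
      · exact h0
    rw [getrLoop_invariant (n - 2 ^ Nat.log2 (n + 1)) _ _]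
    have hA : getrA n =
        (PySem.Int.powMod 3 (Nat.log2 (n + 1)) pvLARGE
          + 2 * getrA (n - 2 ^ Nat.log2 (n + 1))) % pvLARGE := by
      rw [getrA.eq_def]
      have h0 : ¬ n = 0 := by omega
      have h1 : ¬ n = 1 := by
        intro h1; subst h1; exact h (by decide)
      rw [dif_neg h0, dif_neg h1, getrWhile_eq_log2 n 0 (by omega)]
      simp [h]
    rw [hA]
    exact pv_mod_step r c _ _ _
  termination_by n

-- ===== VERDICT (by name: the statement is the Claim_ definition above) =====
theorem get_r_spec : Claim_equal_get_r := by
  intro vr _ _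
  unfold Spec_get_r get_r get_r_alt
  rw [getrLoop_invariant, one_mul, zero_add]
  exact (Int.emod_eq_of_lt (getrA_range vr.toNat).1 (getrA_range vr.toNat).2).symm
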